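-- pv_equiv track=rewrite | github.com/Ricas2410/SearchFind | subscriptions/resume_analyzer.py | _identify_highest_degree
-- ===== SOURCE A (Python) =====
-- def _identify_highest_degree(parsed_education):
--     """Identify the highest degree from education entries."""
--     if not parsed_education:
--         return None
--
--     # Degree hierarchy
--     degree_levels = {
--         'phd': 5,
--         'doctorate': 5,
--         'doctor': 5,
--         'master': 4,
--         'mba': 4,
--         'bachelor': 3,
--         'undergraduate': 3,
--         'associate': 2,
--         'diploma': 1,
--         'certificate': 1,
--         'high school': 0
--     }
--
--     highest_level = -1
--     highest_degree = None
--
--     for entry in parsed_education: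
--         degree = entry.get('degree', '').lower()
--         for key, level in degree_levels.items():
--             if key in degree and level > highest_level:
--                 highest_level = level
--                 highest_degree = entry
--
--     return highest_degree
-- ===== SOURCE B (Python) =====
-- def _identify_highest_degree(parsed_education):
--     """Return the first education entry at the highest degree tier, or None.
--
--     Scans tier by tier from the highest degree level downward and returns the
--     first entry whose 'degree' field mentions a keyword of the current tier.
--     """
--     tiers = [
--         (5, ('phd', 'doctorate', 'doctor')),
--         (4, ('master', 'mba')),
--         (3, ('bachelor', 'undergraduate')),
--         (2, ('associate',)),
--         (1, ('diploma', 'certificate')),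
--         (0, ('high school',)),
--     ]
--     for _level, keywords in tiers:
--         for entry in parsed_education:
--             degree = entry.get('degree', '').lower()
--             if any(k in degree for k in keywords):
--                 return entry
--     return None
-- ===== Notes on version B (the rewrite author's own statement) =====
-- stated objective: alternative
-- what changed: A's single entry-major pass that threads a running (highest_level, highest_degree) pair through a nested scan of the keyword dict is replaced by a tier-major search: degree keywords are grouped by level in descending order and B returns, via early return, the first entry matching any keyword of the highest tier that matches at all, with no scores or running maximum kept.
import Mathlib
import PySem

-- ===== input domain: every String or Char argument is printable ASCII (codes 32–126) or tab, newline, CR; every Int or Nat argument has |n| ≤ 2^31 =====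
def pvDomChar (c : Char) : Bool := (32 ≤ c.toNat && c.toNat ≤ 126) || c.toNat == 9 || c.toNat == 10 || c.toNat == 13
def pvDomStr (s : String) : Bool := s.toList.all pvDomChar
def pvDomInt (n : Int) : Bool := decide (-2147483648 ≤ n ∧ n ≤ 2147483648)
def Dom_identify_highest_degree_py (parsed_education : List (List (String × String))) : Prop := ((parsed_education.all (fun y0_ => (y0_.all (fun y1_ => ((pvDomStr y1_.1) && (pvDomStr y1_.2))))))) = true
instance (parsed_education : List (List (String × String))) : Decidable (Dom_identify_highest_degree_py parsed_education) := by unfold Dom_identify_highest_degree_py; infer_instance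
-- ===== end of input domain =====

-- B replaces A's entry-major scan with a running max by a tier-major search (highest degree tier first, early return); objective: alternative, same asymptotic cost.


-- ===== PORT A =====
-- A's degree_levels dict, in its insertion order
def pvDegreeLevels : List (String × Int) :=
  [("phd", 5), ("doctorate", 5), ("doctor", 5), ("master", 4), ("mba", 4),
   ("bachelor", 3), ("undergraduate", 3), ("associate", 2), ("diploma", 1),
   ("certificate", 1), ("high school", 0)]

def identify_highest_degree_py (parsed_education : List (List (String × String))) : Option (List (String × String)) :=
  if parsed_education = [] then none
  else
    (parsed_education.foldl
      (fun (st : Int × Option (List (String × String))) entry =>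
        let degree := PySem.Str.lower (PySem.Dict.getD (PySem.Dict.mk entry) "degree" "")
        pvDegreeLevels.foldl
          (fun st p =>
            if PySem.Str.isIn p.1 degree && decide (st.1 < p.2) then (p.2, some entry) else st)
          st)
      (-1, none)).2

-- ===== PORT B =====
-- B's tiers: (level, keywords) in descending level order
def pvTiers : List (Int × List String) :=
  [(5, ["phd", "doctorate", "doctor"]),
   (4, ["master", "mba"]),
   (3, ["bachelor", "undergraduate"]),
   (2, ["associate"]),
   (1, ["diploma", "certificate"]),
   (0, ["high school"])]

def identify_highest_degree_py_alt (parsed_education : List (List (String × String))) : Option (List (String × String)) :=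
  pvTiers.findSome? (fun tier =>
    parsed_education.find? (fun entry =>
      let degree := PySem.Str.lower (PySem.Dict.getD (PySem.Dict.mk entry) "degree" "")
      tier.2.any (fun k => PySem.Str.isIn k degree)))

-- ===== PRECONDITION & SPEC =====
def Spec_identify_highest_degree_py (parsed_education : List (List (String × String))) (out : Option (List (String × String))) : Prop := out = identify_highest_degree_py_alt parsed_education
instance (parsed_education : List (List (String × String))) (out : Option (List (String × String))) : Decidable (Spec_identify_highest_degree_py parsed_education out) := by unfold Spec_identify_highest_degree_py; infer_instance

-- ===== CLAIM (what is proved, stated in full; the proofs are below) =====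
def Claim_equal_identify_highest_degree_py : Prop := ∀ (parsed_education : List (List (String × String))), Dom_identify_highest_degree_py parsed_education → Spec_identify_highest_degree_py parsed_education (identify_highest_degree_py parsed_education)

-- ===== LEMMAS AND PROOFS =====

-- the lowercased 'degree' field of an entry
def pvDeg (entry : List (String × String)) : String :=
  PySem.Str.lower (PySem.Dict.getD (PySem.Dict.mk entry) "degree" "")

-- levels of the table keys occurring in d
def pvMs (ds : List (String × Int)) (d : String) : List Int :=
  (ds.filter (fun p => PySem.Str.isIn p.1 d)).map (·.2)

-- matching levels of an entry
def pvLv (e : List (String × String)) : List Int := pvMs pvDegreeLevels (pvDeg e)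

-- score(e): the max matching level, or none
def pvScore (entry : List (String × String)) : Option Int :=
  match pvLv entry with
  | [] => none
  | h :: t => some (t.foldl max h)

-- tier keyword match
def pvTierMatch (ks : List String) (entry : List (String × String)) : Bool :=
  ks.any (fun k => PySem.Str.isIn k (pvDeg entry))

-- A's per-entry step, named
def pvAstep (st : Int × Option (List (String × String))) (entry : List (String × String)) :
    Int × Option (List (String × String)) :=
  pvDegreeLevels.foldl
    (fun st p =>
      if PySem.Str.isIn p.1 (pvDeg entry) && decide (st.1 < p.2) then (p.2, some entry) else st) st

-- the first-maximal argmax step with the score key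
def pvBstep (m x : List (String × String)) : List (String × String) :=
  if (pvScore m).getD 0 < (pvScore x).getD 0 then x else m

-- the intermediate form both programs are reduced to: first-maximal scored entry
def pvArgmax (pe : List (List (String × String))) : Option (List (String × String)) :=
  PySem.List.max? (pe.filter (fun entry => (pvScore entry).isSome))
    (fun entry => (pvScore entry).getD 0)

lemma pv_foldl_max_max (t : List Int) (a b : Int) :
    t.foldl max (max a b) = max a (t.foldl max b) := by
  induction t generalizing b with
  | nil => rfl
  | cons x t ih => simpa [List.foldl, max_assoc] using ih (max b x)

lemma pv_foldl_max_mem (t : List Int) (h : Int) : t.foldl max h ∈ h :: t := by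
  induction t generalizing h with
  | nil => simp
  | cons x t ih =>
    rw [List.foldl_cons]
    rcases List.mem_cons.mp (ih (max h x)) with h1 | h1
    · rw [h1]; rcases max_choice h x with hm | hm <;> simp [hm]
    · simp [h1]

lemma pv_le_foldl_max (t : List Int) (h : Int) : ∀ m ∈ h :: t, m ≤ t.foldl max h := by
  induction t generalizing h with
  | nil =>
    intro m hm
    simp only [List.mem_singleton] at hm
    simp only [List.foldl_nil]
    omega
  | cons x t ih =>
    intro m hm
    rw [List.foldl_cons]
    have hbase : max h x ≤ t.foldl max (max h x) :=
      ih (max h x) (max h x) (List.mem_cons_self ..)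
    rcases List.mem_cons.mp hm with rfl | hm'
    · exact le_trans (le_max_left _ _) hbase
    · rcases List.mem_cons.mp hm' with rfl | hm''
      · exact le_trans (le_max_right _ _) hbase
      · exact ih (max h x) m (List.mem_cons_of_mem _ hm'')

-- A's inner loop over the table, characterised by the matching levels
lemma pv_inner (ds : List (String × Int)) (d : String) (e : List (String × String))
    (st : Int × Option (List (String × String))) :
    ds.foldl (fun st p =>
        if PySem.Str.isIn p.1 d && decide (st.1 < p.2) then (p.2, some e) else st) st
    = match pvMs ds d with
      | [] => st
      | h :: t => (max st.1 (t.foldl max h), if st.1 < t.foldl max h then some e else st.2) := by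
  induction ds generalizing st with
  | nil => rfl
  | cons p ds ih =>
    rw [List.foldl_cons, ih]
    by_cases hin : PySem.Str.isIn p.1 d
    · have hin' : PySem.Chars.isIn p.1.toList d.toList = true := by simpa using hin
      have hms : pvMs (p :: ds) d = p.2 :: pvMs ds d := by
        simp [pvMs, hin']
      rw [hms]
      rcases hms2 : pvMs ds d with _ | ⟨h2, t2⟩ <;> dsimp only
      · simp only [hin, Bool.true_and, decide_eq_true_eq, List.foldl_nil]
        by_cases h1 : st.1 < p.2
        · simp only [if_pos h1]
          have : max st.1 p.2 = p.2 := by omega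
          simp [this]
        · simp only [if_neg h1]
          have : max st.1 p.2 = st.1 := by omega
          simp [this]
      · have hfm : List.foldl max p.2 (h2 :: t2) = max p.2 (List.foldl max h2 t2) := by
          rw [List.foldl_cons, pv_foldl_max_max]
        rw [hfm]
        simp only [hin, Bool.true_and, decide_eq_true_eq]
        by_cases h1 : st.1 < p.2
        · simp only [if_pos h1]
          have hc : st.1 < max p.2 (List.foldl max h2 t2) := by omega
          have hm : max st.1 (max p.2 (List.foldl max h2 t2)) = max p.2 (List.foldl max h2 t2) := by omega
          simp [hc, hm]
        · simp only [if_neg h1]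
          have hm : max st.1 (max p.2 (List.foldl max h2 t2)) = max st.1 (List.foldl max h2 t2) := by omega
          by_cases h2' : st.1 < List.foldl max h2 t2
          · have hc : st.1 < max p.2 (List.foldl max h2 t2) := by omega
            simp [hc, hm, h2']
          · have hc : ¬ st.1 < max p.2 (List.foldl max h2 t2) := by omega
            simp [hc, hm, h2']
    · have hin' : PySem.Chars.isIn p.1.toList d.toList = false := by
        simpa using hin
      have hms : pvMs (p :: ds) d = pvMs ds d := by
        simp [pvMs, hin']
      simp [hin', hms]

-- every matching level is one of the table's levels
lemma pv_lv_mem_levels {e : List (String × String)} {m : Int} (h : m ∈ pvLv e) :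
    m ∈ ([5, 4, 3, 2, 1, 0] : List Int) := by
  simp only [pvLv, pvMs, List.mem_map, List.mem_filter] at h
  obtain ⟨p, ⟨hmem, -⟩, rfl⟩ := h
  fin_cases hmem <;> norm_num

lemma pv_score_mem {e : List (String × String)} {m : Int} (h : pvScore e = some m) :
    m ∈ pvLv e := by
  unfold pvScore at h
  rcases hl : pvLv e with _ | ⟨h1, t1⟩ <;> rw [hl] at h
  · exact absurd h (by simp)
  · obtain rfl : t1.foldl max h1 = m := by simpa using h
    exact hl ▸ pv_foldl_max_mem t1 h1

lemma pv_mem_score {e : List (String × String)} {L : Int} (h : L ∈ pvLv e) :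
    ∃ m, pvScore e = some m ∧ L ≤ m := by
  unfold pvScore
  rcases hl : pvLv e with _ | ⟨h1, t1⟩ <;> rw [hl] at h
  · exact absurd h (by simp)
  · exact ⟨t1.foldl max h1, rfl, pv_le_foldl_max t1 h1 L h⟩

lemma pv_score_nonneg {e : List (String × String)} {m : Int} (h : pvScore e = some m) : 0 ≤ m := by
  have := pv_lv_mem_levels (pv_score_mem h)
  fin_cases this <;> norm_num

-- pvMs over a cons, as an append
lemma pv_ms_nil (d : String) : pvMs [] d = [] := rfl

lemma pv_ms_cons (k : String) (v : Int) (ds : List (String × Int)) (d : String) :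
    pvMs ((k, v) :: ds) d = (if PySem.Str.isIn k d then [v] else []) ++ pvMs ds d := by
  by_cases h : PySem.Str.isIn k d
  · have h' : PySem.Chars.isIn k.toList d.toList = true := by simpa using h
    simp [pvMs, h']
  · have h' : PySem.Chars.isIn k.toList d.toList = false := by simpa using h
    simp [pvMs, h']

-- the matching-level list, expressed through the eleven keyword-occurrence booleans
def pvMsB (b1 b2 b3 b4 b5 b6 b7 b8 b9 b10 b11 : Bool) : List Int :=
  (if b1 then [(5 : Int)] else []) ++ ((if b2 then [5] else []) ++ ((if b3 then [5] else []) ++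
  ((if b4 then [4] else []) ++ ((if b5 then [4] else []) ++
  ((if b6 then [3] else []) ++ ((if b7 then [3] else []) ++
  ((if b8 then [2] else []) ++
  ((if b9 then [1] else []) ++ ((if b10 then [1] else []) ++
  (if b11 then [0] else []))))))))))

lemma pv_lv_eq (e : List (String × String)) :
    pvLv e = pvMsB (PySem.Str.isIn "phd" (pvDeg e)) (PySem.Str.isIn "doctorate" (pvDeg e))
      (PySem.Str.isIn "doctor" (pvDeg e)) (PySem.Str.isIn "master" (pvDeg e))
      (PySem.Str.isIn "mba" (pvDeg e)) (PySem.Str.isIn "bachelor" (pvDeg e))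
      (PySem.Str.isIn "undergraduate" (pvDeg e)) (PySem.Str.isIn "associate" (pvDeg e))
      (PySem.Str.isIn "diploma" (pvDeg e)) (PySem.Str.isIn "certificate" (pvDeg e))
      (PySem.Str.isIn "high school" (pvDeg e)) := by
  show pvMs pvDegreeLevels (pvDeg e) = _
  rw [pvDegreeLevels, pv_ms_cons, pv_ms_cons, pv_ms_cons, pv_ms_cons, pv_ms_cons, pv_ms_cons,
    pv_ms_cons, pv_ms_cons, pv_ms_cons, pv_ms_cons, pv_ms_cons, pv_ms_nil, List.append_nil]
  rfl

-- per-tier membership bridge, decided over the eleven booleans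
set_option maxHeartbeats 2000000 in
lemma pv_bridge : ∀ b1 b2 b3 b4 b5 b6 b7 b8 b9 b10 b11 : Bool,
    (((5 : Int) ∈ pvMsB b1 b2 b3 b4 b5 b6 b7 b8 b9 b10 b11) ↔ (b1 || b2 || b3) = true) ∧
    (((4 : Int) ∈ pvMsB b1 b2 b3 b4 b5 b6 b7 b8 b9 b10 b11) ↔ (b4 || b5) = true) ∧
    (((3 : Int) ∈ pvMsB b1 b2 b3 b4 b5 b6 b7 b8 b9 b10 b11) ↔ (b6 || b7) = true) ∧
    (((2 : Int) ∈ pvMsB b1 b2 b3 b4 b5 b6 b7 b8 b9 b10 b11) ↔ b8 = true) ∧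
    (((1 : Int) ∈ pvMsB b1 b2 b3 b4 b5 b6 b7 b8 b9 b10 b11) ↔ (b9 || b10) = true) ∧
    (((0 : Int) ∈ pvMsB b1 b2 b3 b4 b5 b6 b7 b8 b9 b10 b11) ↔ b11 = true) := by
  decide

-- tier match ↔ the tier's level is a matching level, for every tier of pvTiers
lemma pv_tier_iff : ∀ L ks, (L, ks) ∈ pvTiers → ∀ e : List (String × String),
    (pvTierMatch ks e = true ↔ L ∈ pvLv e) := by
  intro L ks hmem e
  have hb := pv_bridge (PySem.Str.isIn "phd" (pvDeg e)) (PySem.Str.isIn "doctorate" (pvDeg e))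
    (PySem.Str.isIn "doctor" (pvDeg e)) (PySem.Str.isIn "master" (pvDeg e))
    (PySem.Str.isIn "mba" (pvDeg e)) (PySem.Str.isIn "bachelor" (pvDeg e))
    (PySem.Str.isIn "undergraduate" (pvDeg e)) (PySem.Str.isIn "associate" (pvDeg e))
    (PySem.Str.isIn "diploma" (pvDeg e)) (PySem.Str.isIn "certificate" (pvDeg e))
    (PySem.Str.isIn "high school" (pvDeg e))
  rw [pv_lv_eq]
  simp only [pvTiers, List.mem_cons, List.not_mem_nil, or_false, Prod.mk.injEq] at hmem
  obtain ⟨rfl, rfl⟩ | ⟨rfl, rfl⟩ | ⟨rfl, rfl⟩ | ⟨rfl, rfl⟩ | ⟨rfl, rfl⟩ | ⟨rfl, rfl⟩ := hmem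
  · rw [hb.1]; clear hb
    simp only [pvTierMatch, List.any_cons, List.any_nil, Bool.or_false, Bool.or_eq_true]
    exact or_assoc.symm
  · rw [hb.2.1]; clear hb
    simp only [pvTierMatch, List.any_cons, List.any_nil, Bool.or_false, Bool.or_eq_true]
  · rw [hb.2.2.1]; clear hb
    simp only [pvTierMatch, List.any_cons, List.any_nil, Bool.or_false, Bool.or_eq_true]
  · rw [hb.2.2.2.1]; clear hb
    simp only [pvTierMatch, List.any_cons, List.any_nil, Bool.or_false]
  · rw [hb.2.2.2.2.1]; clear hb
    simp only [pvTierMatch, List.any_cons, List.any_nil, Bool.or_false, Bool.or_eq_true]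
  · rw [hb.2.2.2.2.2]; clear hb
    simp only [pvTierMatch, List.any_cons, List.any_nil, Bool.or_false]

-- max? of a nonempty list is the plain argmax fold over the tail
lemma pv_max?_cons {α : Type} (key : α → Int) (x : α) (xs : List α) :
    PySem.List.max? (x :: xs) key
      = some (xs.foldl (fun m y => if key m < key y then y else m) x) := by
  induction xs generalizing x with
  | nil => rfl
  | cons y ys ih =>
    have h1 : PySem.List.max? (x :: y :: ys) key
        = PySem.List.max? ((if key x < key y then y else x) :: ys) key := by
      unfold PySem.List.max?
      rw [List.foldl_cons, List.foldl_cons, List.foldl_cons]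
      by_cases h : key x < key y <;> simp [h]
    rw [h1, ih, List.foldl_cons]

-- never exceeded ⇒ the argmax fold keeps its accumulator
lemma pv_fold_keep {α : Type} (key : α → Int) (b : α) (xs : List α)
    (h : ∀ x ∈ xs, key x ≤ key b) :
    xs.foldl (fun m y => if key m < key y then y else m) b = b := by
  induction xs with
  | nil => rfl
  | cons x xs ih =>
    rw [List.foldl_cons, if_neg (by have := h x (by simp); omega)]
    exact ih (fun x hx => h x (by simp [hx]))

-- strictly exceeded later ⇒ the argmax fold lands on the first maximal element
lemma pv_fold_first {α : Type} (key : α → Int) (b : α) (u v : List α) (e : α)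
    (hb : key b < key e) (hu : ∀ x ∈ u, key x < key e) (hv : ∀ y ∈ v, key y ≤ key e) :
    (u ++ e :: v).foldl (fun m y => if key m < key y then y else m) b = e := by
  induction u generalizing b with
  | nil =>
    rw [List.nil_append, List.foldl_cons, if_pos hb]
    exact pv_fold_keep key e v hv
  | cons x u ih =>
    rw [List.cons_append, List.foldl_cons]
    by_cases h : key b < key x
    · rw [if_pos h]
      exact ih x (hu x (by simp)) (fun x' hx' => hu x' (by simp [hx']))
    · rw [if_neg h]
      exact ih b hb (fun x' hx' => hu x' (by simp [hx']))

-- first-maximal characterisation of max?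
lemma pv_argmax_first {α : Type} (key : α → Int) (u v : List α) (e : α)
    (hu : ∀ x ∈ u, key x < key e) (hv : ∀ y ∈ v, key y ≤ key e) :
    PySem.List.max? (u ++ e :: v) key = some e := by
  rcases u with _ | ⟨x, u⟩
  · rw [List.nil_append, pv_max?_cons]
    exact congrArg some (pv_fold_keep key e v hv)
  · rw [List.cons_append, pv_max?_cons]
    exact congrArg some
      (pv_fold_first key x u v e (hu x (by simp)) (fun x' hx' => hu x' (by simp [hx'])) hv)

-- the tier-major search over a tier suffix computes the first-maximal scored entry
lemma pv_G : ∀ (tl : List (Int × List String)) (pe : List (List (String × String))),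
    (∀ L ks, (L, ks) ∈ tl → ∀ e : List (String × String),
      (pvTierMatch ks e = true ↔ L ∈ pvLv e)) →
    List.Pairwise (fun a b => b.1 < a.1) tl →
    (∀ e ∈ pe, ∀ m, pvScore e = some m → m ∈ tl.map (·.1)) →
    tl.findSome? (fun t => pe.find? (fun e => pvTierMatch t.2 e)) = pvArgmax pe := by
  intro tl
  induction tl with
  | nil =>
    intro pe _ _ hBound
    have hfil : pe.filter (fun e => (pvScore e).isSome) = [] := by
      rw [List.filter_eq_nil_iff]
      intro e he
      cases hs : pvScore e with
      | none => simp
      | some m => exact absurd (hBound e he m hs) (by simp)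
    rw [List.findSome?_nil]
    unfold pvArgmax
    rw [hfil]
    rfl
  | cons hd rest ih =>
    intro pe hTier hSorted hBound
    obtain ⟨L, ks⟩ := hd
    have hTierHd := hTier L ks (by simp)
    have hRestLt : ∀ p ∈ rest, p.1 < L := (List.pairwise_cons.mp hSorted).1
    cases hf : pe.find? (fun e => pvTierMatch ks e) with
    | none =>
      have hno : ∀ e ∈ pe, pvTierMatch ks e = false := by
        intro e he
        simpa using List.find?_eq_none.mp hf e he
      rw [List.findSome?_cons]
      rw [hf]
      apply ih pe (fun L' ks' h' e => hTier L' ks' (List.mem_cons_of_mem _ h') e)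
        (List.pairwise_cons.mp hSorted).2
      intro e he m hs
      have hm := hBound e he m hs
      rw [List.map_cons] at hm
      rcases List.mem_cons.mp hm with rfl | h2
      · exact absurd ((hTierHd e).mpr (pv_score_mem hs)) (by simp [hno e he])
      · exact h2
    | some e =>
      obtain ⟨hpe_match, u, v, hsplit, hu⟩ := List.find?_eq_some_iff_append.mp hf
      have hLe : L ∈ pvLv e := (hTierHd e).mp hpe_match
      obtain ⟨m, hsm, hLm⟩ := pv_mem_score hLe
      have hin : e ∈ pe := by rw [hsplit]; simp
      have hub : ∀ x ∈ pe, ∀ m', pvScore x = some m' → m' ≤ L := by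
        intro x hx m' hs'
        have hm := hBound x hx m' hs'
        rw [List.map_cons] at hm
        rcases List.mem_cons.mp hm with rfl | h1
        · omega
        · obtain ⟨p, hp, rfl⟩ := List.mem_map.mp h1
          have := hRestLt p hp; omega
      have hmL : m = L := le_antisymm (hub e hin m hsm) hLm
      have hkey_e : (pvScore e).getD 0 = L := by rw [hsm, hmL]; rfl
      have hu' : ∀ x ∈ pe, pvTierMatch ks x = false → ∀ m', pvScore x = some m' → m' < L := by
        intro x hx hfx m' hs'
        rcases lt_or_eq_of_le (hub x hx m' hs') with h | rfl
        · exact h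
        · exact absurd ((hTierHd x).mpr (pv_score_mem hs')) (by simp [hfx])
      have hfil : pe.filter (fun x => (pvScore x).isSome)
          = u.filter (fun x => (pvScore x).isSome) ++ e :: v.filter (fun x => (pvScore x).isSome) := by
        rw [hsplit, List.filter_append, List.filter_cons, if_pos (by simp [hsm])]
      have hres : pvArgmax pe = some e := by
        unfold pvArgmax
        rw [hfil]
        apply pv_argmax_first
        · intro x hxmem
          have hxu := List.mem_filter.mp hxmem
          have hxpe : x ∈ pe := by rw [hsplit]; exact List.mem_append_left _ hxu.1
          obtain ⟨m', hm'⟩ := Option.isSome_iff_exists.mp hxu.2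
          have hfx : pvTierMatch ks x = false := by simpa using hu x hxu.1
          have := hu' x hxpe hfx m' hm'
          rw [hkey_e, hm']
          simpa using this
        · intro y hymem
          have hy := List.mem_filter.mp hymem
          have hype : y ∈ pe := by
            rw [hsplit]; exact List.mem_append_right _ (List.mem_cons_of_mem _ hy.1)
          obtain ⟨m', hm'⟩ := Option.isSome_iff_exists.mp hy.2
          have := hub y hype m' hm'
          rw [hkey_e, hm']
          simpa using this
      rw [List.findSome?_cons, hf, hres]

-- A's loop, once an entry is held, runs the argmax fold over the scoring entries
lemma pv_outer (pe : List (List (String × String))) :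
    ∀ (hl : Int) (b : List (String × String)), pvScore b = some hl →
      pe.foldl pvAstep (hl, some b)
        = (((pe.filter (fun e => (pvScore e).isSome)).foldl pvBstep b) |> fun c =>
            ((pvScore c).getD 0, some c)) := by
  induction pe with
  | nil => intro hl b hb; simp [hb]
  | cons e t ih =>
    intro hl b hb
    have hstep : pvAstep (hl, some b) e
        = match pvLv e with
          | [] => (hl, some b)
          | h :: t => (max hl (t.foldl max h), if hl < t.foldl max h then some e else some b) :=
      pv_inner pvDegreeLevels (pvDeg e) e (hl, some b)
    have hse : pvScore e = match pvLv e with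
        | [] => none
        | h :: t => some (t.foldl max h) := rfl
    rw [List.foldl_cons, hstep]
    rcases hms : pvLv e with _ | ⟨h1, t1⟩ <;> rw [hms] at hse <;> dsimp only
    · have hnone : (pvScore e).isSome = false := by rw [hse]; rfl
      rw [List.filter_cons_of_neg (by simp [hnone]), ih hl b hb]
    · have hsome : (pvScore e).isSome = true := by rw [hse]; rfl
      rw [List.filter_cons_of_pos (by simp [hsome]), List.foldl_cons]
      by_cases h1' : hl < t1.foldl max h1
      · have hmax : max hl (t1.foldl max h1) = t1.foldl max h1 := by omega
        have hbst : pvBstep b e = e := by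
          simp [pvBstep, hb, hse, h1']
        rw [if_pos h1', hmax, hbst, ih _ e hse]
      · have hmax : max hl (t1.foldl max h1) = hl := by omega
        have hbst : pvBstep b e = b := by
          simp only [pvBstep, hb, hse, Option.getD_some]
          rw [if_neg h1']
        rw [if_neg h1', hmax, hbst, ih hl b hb]

-- from the initial (-1, None) state, A computes the first-maximal scored entry
lemma pv_top (pe : List (List (String × String))) :
    (pe.foldl pvAstep (-1, none)).2 = pvArgmax pe := by
  induction pe with
  | nil => rfl
  | cons e t ih =>
    have hstep : pvAstep (-1, none) e
        = match pvLv e with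
          | [] => ((-1 : Int), none)
          | h :: t => (max (-1) (t.foldl max h), if (-1 : Int) < t.foldl max h then some e else none) :=
      pv_inner pvDegreeLevels (pvDeg e) e ((-1 : Int), none)
    have hse : pvScore e = match pvLv e with
        | [] => none
        | h :: t => some (t.foldl max h) := rfl
    rw [List.foldl_cons, hstep]
    rcases hms : pvLv e with _ | ⟨h1, t1⟩ <;> rw [hms] at hse <;> dsimp only
    · have hnone : (pvScore e).isSome = false := by rw [hse]; rfl
      rw [ih]
      unfold pvArgmax
      rw [List.filter_cons_of_neg (by simp [hnone])]
    · have hpos : (0 : Int) ≤ t1.foldl max h1 := pv_score_nonneg hse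
      have h1' : (-1 : Int) < t1.foldl max h1 := by omega
      have hmax : max (-1 : Int) (t1.foldl max h1) = t1.foldl max h1 := by omega
      rw [if_pos h1', hmax, pv_outer t _ e hse]
      have hsome : (pvScore e).isSome = true := by rw [hse]; rfl
      unfold pvArgmax
      rw [List.filter_cons_of_pos (by simp [hsome]), pv_max?_cons]
      rfl

-- ===== VERDICT (by name: the statement is the Claim_ definition above) =====
theorem identify_highest_degree_py_spec : Claim_equal_identify_highest_degree_py := by
  intro pe _
  unfold Spec_identify_highest_degree_py
  have hB : identify_highest_degree_py_alt pe = pvArgmax pe := by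
    have h := pv_G pvTiers pe pv_tier_iff (by decide)
      (fun e he m hs => by simpa [pvTiers] using pv_lv_mem_levels (pv_score_mem hs))
    exact h
  rw [hB]
  rcases pe with _ | ⟨e, t⟩
  · rfl
  · have hA : identify_highest_degree_py (e :: t) = ((e :: t).foldl pvAstep (-1, none)).2 := by
      rw [identify_highest_degree_py, if_neg (by simp)]
      rfl
    rw [hA, pv_top]
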